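-- pv_equiv track=rewrite | github.com/LocusLontrime/Python | CodeWars_Rush/_6kyu/Rank_Vector_6kyu.py | ranks
-- ===== SOURCE A (Python) =====
-- def ranks(a):
--     b = a.copy()
--     b.sort(reverse=True)
--
--     pairs = dict()
--
--     counter = 1
--     for i in range(len(b)):
--         if b[i] not in pairs:
--             pairs[b[i]] = counter
--         counter += 1
--
--     result = []
--
--     for i in range(len(a)):
--         result.append(pairs[a[i]])
--
--     return result
-- ===== SOURCE B (Python) =====
-- def ranks(a):
--     return [1 + sum(1 for x in a if x > e) for e in a]
-- ===== Notes on version B (the rewrite author's own statement) =====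
-- stated objective: simpler
-- what changed: Replaces the sort-then-first-occurrence-dict construction with a one-line direct count: each element's rank is 1 plus the number of strictly greater elements.
import Mathlib
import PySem

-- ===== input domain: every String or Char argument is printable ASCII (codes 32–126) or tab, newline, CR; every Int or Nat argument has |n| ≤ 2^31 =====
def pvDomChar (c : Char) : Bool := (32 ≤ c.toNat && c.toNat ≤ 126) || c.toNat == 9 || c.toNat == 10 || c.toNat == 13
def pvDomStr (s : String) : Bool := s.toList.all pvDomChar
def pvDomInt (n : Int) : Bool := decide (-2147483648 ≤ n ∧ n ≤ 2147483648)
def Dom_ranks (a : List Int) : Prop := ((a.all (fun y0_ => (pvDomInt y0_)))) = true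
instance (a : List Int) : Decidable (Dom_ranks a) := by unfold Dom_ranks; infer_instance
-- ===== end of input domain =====

-- B replaces A's sort + first-occurrence dict with a direct strictly-greater count per element (simpler, same order of ranks).

-- ===== PORT A =====
-- the dict/counter loop: state is (pairs, counter); insert only when the key is absent, counter bumps every step
def ranksStep (st : PySem.Dict Int Int × Int) (x : Int) : PySem.Dict Int Int × Int :=
  (if st.1.contains x then st.1 else st.1.insert x st.2, st.2 + 1)

def ranks (a : List Int) : List Int :=
  let b := PySem.List.sorted a (fun x => x) true
  let pairs := (b.foldl ranksStep (PySem.Dict.empty, 1)).1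
  -- pairs[a[i]]: every a[i] is a key of pairs (it came from b, a permutation of a), so the
  -- KeyError branch of Python's lookup is unreachable; getD 0 is exact here.
  a.map (fun x => (pairs.get? x).getD 0)

-- ===== PORT B =====
def ranks_alt (a : List Int) : List Int :=
  a.map (fun e => 1 + (a.countP (fun x => decide (e < x)) : Int))

-- ===== PRECONDITION & SPEC =====
def Spec_ranks (a : List Int) (out : List Int) : Prop := out = ranks_alt a
instance (a : List Int) (out : List Int) : Decidable (Spec_ranks a out) := by unfold Spec_ranks; infer_instance

-- ===== CLAIM (what is proved, stated in full; the proofs are below) =====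
def Claim_equal_ranks : Prop := ∀ (a : List Int), Dom_ranks a → Spec_ranks a (ranks a)

-- ===== LEMMAS AND PROOFS =====

-- once a key is bound, the loop never rebinds it
theorem ranksStep_stable (b : List Int) (st : PySem.Dict Int Int × Int) (v w : Int)
    (h : st.1.get? v = some w) : (b.foldl ranksStep st).1.get? v = some w := by
  induction b generalizing st with
  | nil => simpa using h
  | cons x t ih =>
    simp only [List.foldl_cons]
    apply ih
    simp only [ranksStep]
    by_cases hxv : x = v
    · subst hxv
      have : st.1.contains x = true := by
        rw [PySem.Dict.contains_eq_isSome_get?, h]; rfl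
      simp [this, h]
    · by_cases hc : st.1.contains x = true
      · simp [hc, h]
      · simp only [hc]
        simpa [PySem.Dict.get?_insert_of_ne _ _ (Ne.symm hxv)] using h

-- on a descending list, a fresh key v gets bound to c + (#strictly greater elements)
theorem ranksStep_value (b : List Int) (d : PySem.Dict Int Int) (c : Int) (v : Int)
    (hs : b.Pairwise (fun p q => q ≤ p)) (hv : v ∈ b) (hd : d.get? v = none) :
    (b.foldl ranksStep (d, c)).1.get? v
      = some (c + (b.countP (fun x => decide (v < x)) : Int)) := by
  induction b generalizing d c with
  | nil => cases hv
  | cons y t ih =>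
    rw [List.pairwise_cons] at hs
    obtain ⟨hge, hpt⟩ := hs
    by_cases hvy : v = y
    · subst hvy
      have hcz : (v :: t).countP (fun x => decide (v < x)) = 0 := by
        rw [List.countP_eq_zero]
        intro x hx
        rcases List.mem_cons.mp hx with h1 | h1
        · subst h1; simp
        · simpa using not_lt.mpr (hge x h1)
      rw [hcz]
      have hnc : d.contains v = false := by
        rw [PySem.Dict.contains_eq_isSome_get?, hd]; rfl
      simp only [List.foldl_cons, ranksStep, hnc, Bool.false_eq_true, if_false]
      have := ranksStep_stable t (d.insert v c, c + 1) v c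
        (by rw [PySem.Dict.get?_insert_self])
      rw [this]
      norm_num
    · have hvt : v ∈ t := by
        rcases List.mem_cons.mp hv with h1 | h1
        · exact absurd h1 hvy
        · exact h1
      have hlt : v < y := lt_of_le_of_ne (hge v hvt) hvy
      have hcount : (y :: t).countP (fun x => decide (v < x))
          = t.countP (fun x => decide (v < x)) + 1 := by
        simp [hlt]
      simp only [List.foldl_cons, ranksStep]
      by_cases hc : d.contains y = true
      · simp only [hc, if_true]
        rw [ih d (c + 1) hpt hvt hd, hcount]
        push_cast; ring_nf
      · simp only [hc, Bool.false_eq_true, if_false]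
        rw [ih (d.insert y c) (c + 1) hpt hvt
          (by rw [PySem.Dict.get?_insert_of_ne _ _ hvy]; exact hd), hcount]
        push_cast; ring_nf

-- ===== VERDICT (by name: the statement is the Claim_ definition above) =====
theorem ranks_spec : Claim_equal_ranks := by
  intro a _
  show ranks a = ranks_alt a
  unfold ranks ranks_alt
  apply List.map_congr_left
  intro x hx
  have hperm : (PySem.List.sorted a (fun x => x) true).Perm a := PySem.List.sorted_perm a _ _
  have hmem : x ∈ PySem.List.sorted a (fun x => x) true := hperm.mem_iff.mpr hx
  have hpw : (PySem.List.sorted a (fun x => x) true).Pairwise (fun p q => q ≤ p) :=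
    PySem.List.sorted_pairwise_rev a (fun x => x)
  rw [ranksStep_value _ PySem.Dict.empty 1 x hpw hmem (PySem.Dict.get?_empty x),
    hperm.countP_eq]
  simp
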